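-- pv_equiv track=rewrite | github.com/UWCCDL/EEG_RateOfForgetting | topomaps.py | expand_camel
-- ===== SOURCE A (Python) =====
-- import string
--
-- def expand_camel(str):
--     "Expands a camel notation string"
--     word = str[0]
--     for char in str[1:]:
--         if char in string.ascii_lowercase:
--             word += char
--         else:
--             word += " "
--             word += char
--     return word
-- ===== SOURCE B (Python) =====
-- import string
--
-- def expand_camel(str):
--     "Expands a camel notation string"
--     def groups(s):
--         toks = []
--         while s:
--             run = 1
--             while run < len(s) and s[run] in string.ascii_lowercase:
--                 run += 1
--             toks.append(s[:run])
--             s = s[run:]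
--         return toks
--     tail = str[1:]
--     k = 0
--     while k < len(tail) and tail[k] in string.ascii_lowercase:
--         k += 1
--     return " ".join([str[0] + tail[:k]] + groups(tail[k:]))
-- ===== Notes on version B (the rewrite author's own statement) =====
-- stated objective: alternative
-- what changed: Instead of appending characters one by one to an accumulator string, B tokenizes the string into runs (first char plus its lowercase run, then one run per non-lowercase char) and joins the tokens with spaces.
import Mathlib
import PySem

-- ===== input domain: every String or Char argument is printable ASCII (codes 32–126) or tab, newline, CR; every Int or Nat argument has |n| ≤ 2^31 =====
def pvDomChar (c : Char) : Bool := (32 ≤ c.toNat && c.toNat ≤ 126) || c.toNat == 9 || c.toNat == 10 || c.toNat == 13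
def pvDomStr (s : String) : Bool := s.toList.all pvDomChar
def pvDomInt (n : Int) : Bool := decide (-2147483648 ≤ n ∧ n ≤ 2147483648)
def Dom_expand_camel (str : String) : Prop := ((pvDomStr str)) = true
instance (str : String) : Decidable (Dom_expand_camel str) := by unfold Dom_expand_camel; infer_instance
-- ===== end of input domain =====

-- B replaces A's per-character accumulator loop by tokenizing into runs and joining with spaces (alternative decomposition).

-- ===== PORT A =====
-- A: word = str[0]; for char in str[1:]: append char, or ' '+char if not lowercase.
def expand_camel (str : String) : String :=
  match str.toList with
  | [] => ""   -- unreachable under Pre_ (str[0] raises IndexError in Python)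
  | c :: rest =>
    String.mk (rest.foldl
      (fun word ch => if 'a' ≤ ch ∧ ch ≤ 'z' then word ++ [ch] else word ++ [' ', ch]) [c])

-- ===== PORT B =====
def pvIsLow (ch : Char) : Bool := 'a' ≤ ch && ch ≤ 'z'

-- B's inner `groups` loop: each iteration takes the first char plus its following
-- lowercase run as one token and continues on the remainder.
def pvGroups (l : List Char) : List (List Char) :=
  match l with
  | [] => []
  | ch :: rest => (ch :: rest.takeWhile pvIsLow) :: pvGroups (rest.dropWhile pvIsLow)
termination_by l.length
decreasing_by
  exact Nat.lt_succ_of_le (List.length_dropWhile_le _ _)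

-- B: head token = str[0] + leading lowercase run of the tail; then one token per
-- non-lowercase char (with its lowercase run); ' '.join ported as List.intercalate.
def expand_camel_alt (str : String) : String :=
  match str.toList with
  | [] => ""   -- unreachable under Pre_ (str[0] raises IndexError in Python)
  | c :: rest =>
    String.mk (List.intercalate [' ']
      ((c :: rest.takeWhile pvIsLow) :: pvGroups (rest.dropWhile pvIsLow)))

-- ===== PRECONDITION & SPEC =====
-- Pre_ excludes only the empty string, on which A (and B) raise IndexError at str[0].
def Pre_expand_camel (str : String) : Prop := str ≠ ""
instance (str : String) : Decidable (Pre_expand_camel str) := by unfold Pre_expand_camel; infer_instance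
def pvWitness_expand_camel : String := "RateOfForgetting"

def Spec_expand_camel (str : String) (out : String) : Prop := out = expand_camel_alt str
instance (str : String) (out : String) : Decidable (Spec_expand_camel str out) := by unfold Spec_expand_camel; infer_instance

-- ===== CLAIM (what is proved, stated in full; the proofs are below) =====
def Claim_equal_expand_camel : Prop := ∀ (str : String), Dom_expand_camel str → Pre_expand_camel str → Spec_expand_camel str (expand_camel str)

-- ===== LEMMAS AND PROOFS =====
-- A's foldl with list-append accumulator equals acc ++ flatMap of the per-char expansion.
theorem foldl_expand_eq_flatMap (rest acc : List Char) :
    rest.foldl (fun word ch => if 'a' ≤ ch ∧ ch ≤ 'z' then word ++ [ch] else word ++ [' ', ch]) acc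
      = acc ++ rest.flatMap (fun ch => if 'a' ≤ ch ∧ ch ≤ 'z' then [ch] else [' ', ch]) := by
  induction rest generalizing acc with
  | nil => simp
  | cons ch rest ih =>
    simp only [List.foldl_cons, List.flatMap_cons, ih]
    split_ifs <;> simp

theorem pvGroups_nil : pvGroups [] = [] := by rw [pvGroups.eq_def]

theorem pvGroups_cons (ch : Char) (rest : List Char) :
    pvGroups (ch :: rest) = (ch :: rest.takeWhile pvIsLow) :: pvGroups (rest.dropWhile pvIsLow) := by
  rw [pvGroups.eq_def]

-- intercalate with a head token = head ++ a space before each further token.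
theorem intercalate_space (gs : List (List Char)) (h : List Char) :
    List.intercalate [' '] (h :: gs) = h ++ gs.flatMap (fun g => ' ' :: g) := by
  induction gs generalizing h with
  | nil => simp [List.intercalate]
  | cons g gs ih =>
    have h2 := ih g
    simp only [List.intercalate] at h2 ⊢
    simp [List.intersperse, h2]

-- the per-char expansion of a list = its leading lowercase run, then each group
-- of pvGroups on the remainder prefixed with a space.
theorem flatMap_expand_eq_groups (l : List Char) :
    l.flatMap (fun ch => if 'a' ≤ ch ∧ ch ≤ 'z' then [ch] else [' ', ch])
      = l.takeWhile pvIsLow ++ (pvGroups (l.dropWhile pvIsLow)).flatMap (fun g => ' ' :: g) := by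
  induction l with
  | nil => simp [pvGroups_nil]
  | cons ch rest ih =>
    by_cases h : 'a' ≤ ch ∧ ch ≤ 'z'
    · have hb : pvIsLow ch = true := by simp [pvIsLow, h.1, h.2]
      simp [List.flatMap_cons, h, hb, ih]
    · have hb : pvIsLow ch = false := by
        rw [pvIsLow]
        rcases not_and_or.mp h with h1 | h1 <;> simp [h1]
      simp only [List.flatMap_cons, if_neg h, List.takeWhile_cons, hb, List.dropWhile_cons,
        pvGroups_cons, Bool.false_eq_true, if_false, List.nil_append]
      simp [ih]

-- ===== VERDICT (by name: the statement is the Claim_ definition above) =====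
theorem expand_camel_spec : Claim_equal_expand_camel := by
  intro str _ _
  unfold Spec_expand_camel expand_camel expand_camel_alt
  cases h : str.toList with
  | nil => rfl
  | cons c rest =>
    simp only [foldl_expand_eq_flatMap rest [c], intercalate_space, flatMap_expand_eq_groups,
      List.cons_append, List.nil_append]
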